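-- pv_equiv track=rewrite | github.com/potatoscones/codecademy-projects | Censor Dispenser/censor-dispenser.py | censor_after_two
-- ===== SOURCE A (Python) =====
-- import string
--
-- def findall(text, phrase, check_end = False):                                                       # Last flag optional toggle to disregard whether the term makes a whole word
--     phrase_length = len(phrase)
--     i = text.find(phrase)
--     while i != -1:                                                                                  # If phrase found:
--         if check_end == True:
--             phrase_end = text[i+phrase_length]
--             if phrase_end in string.punctuation or phrase_end == ' ' or phrase_end == '\n':         # Check to make sure it's a whole word (i.e. with punctuation or whitespace after)
--                 yield i                                                                             # Add to the iterator
--         else: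
--             yield i
--         i = text.find(phrase, i+1)                                                                  # Next time, search after the found phrase
--
-- def censor(text):
--     new_text = ''
--     for c in text:
--         if c == ' ':
--             new_text += ' '
--         elif c == '\n':
--             new_text += '\n'
--         elif c in string.punctuation:
--             new_text += c
--         else:
--             new_text += '#'
--     return new_text
--
-- def censor_after_two(text, phrase_list):
--     text_casefold = text.casefold()
--     index_list = []
--     for phrase in phrase_list:                                                                      # First pass to find each phrase in the text
--         phrase_casefold = phrase.casefold()
--         phrase_length = len(phrase)
--         for start_index in findall(text_casefold, phrase_casefold):
--             if start_index >= 0: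
--                 index_list.append(start_index+phrase_length)                                        # Append the end index of phrase if found
--     index_list.sort()                                                                               # Sort all of the end indices
--     if index_list:                                                                                  # If there are any phrases in the text:
--         untouched_text = text[:index_list[1]]                                                       # Decide which text to leave behind
--         censored_text = text[index_list[1]:]                                                        # And which to censor
--         censored_text_casefold = censored_text.casefold()
--         for phrase in phrase_list:
--             phrase_casefold = phrase.casefold()
--             phrase_length = len(phrase)
--             for start_index in findall(censored_text_casefold, phrase_casefold):
--                 end_index = start_index + phrase_length
--                 if start_index > 0:
--                     censored_text = censored_text[:start_index] + censor(censored_text[start_index:end_index]) + censored_text[end_index:]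
--         text = untouched_text + censored_text
--     return text
-- ===== SOURCE B (Python) =====
-- import string
--
-- _KEEP = set(" \n" + string.punctuation)   # characters censor() leaves as-is
--
-- def censor_after_two(text, phrase_list):
--     folded = text.casefold()
--     # one scan: every occurrence of every phrase, as (start, end) spans
--     spans = []
--     for phrase in phrase_list:
--         p = phrase.casefold()
--         i = folded.find(p)
--         while i != -1:
--             spans.append((i, i + len(phrase)))
--             i = folded.find(p, i + 1)
--     ends = sorted(e for _, e in spans)
--     if len(ends) < 2:
--         return text
--     cut = ends[1]                          # end of the second match
--     mask = bytearray(len(text))            # positions to censor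
--     for s, e in spans:
--         if s > cut:
--             for j in range(s, e):
--                 mask[j] = 1
--     return "".join('#' if mask[j] and c not in _KEEP else c
--                    for j, c in enumerate(text))
-- ===== Notes on version B (the rewrite author's own statement) =====
-- stated objective: faster
-- what changed: A re-scans the tail per phrase and rebuilds the whole censored string by slice-splicing once per occurrence (O(n) per occurrence); B scans the text once per phrase collecting (start,end) spans, reuses them for both the cut point and the censoring, marks the spans in a byte mask and emits the result in a single join pass.
-- crash fix: When the phrases have exactly one occurrence in total, A raises IndexError on index_list[1]; B returns the text unchanged (nothing reaches the second match). — e.g. on censor_after_two("hello", ["ell"]): A raises IndexError, B returns "hello"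
import Mathlib
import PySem

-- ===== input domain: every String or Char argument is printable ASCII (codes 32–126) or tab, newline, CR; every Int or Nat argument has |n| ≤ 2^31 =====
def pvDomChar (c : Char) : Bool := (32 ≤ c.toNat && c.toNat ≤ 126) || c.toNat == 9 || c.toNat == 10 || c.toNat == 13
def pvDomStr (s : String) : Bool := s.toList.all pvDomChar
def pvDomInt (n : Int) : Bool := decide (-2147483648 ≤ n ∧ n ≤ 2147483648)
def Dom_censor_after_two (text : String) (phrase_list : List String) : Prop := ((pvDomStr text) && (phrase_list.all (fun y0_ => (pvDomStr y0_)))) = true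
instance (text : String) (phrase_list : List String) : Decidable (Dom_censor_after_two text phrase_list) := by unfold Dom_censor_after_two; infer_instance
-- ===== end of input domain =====

-- B replaces A's per-occurrence slice-splicing rebuild of the censored tail by one span collection,
-- a byte-mask of censored positions and a single output pass (objective: faster; measured).


-- string.punctuation
def pvPunct : List Char := "!\"#$%&'()*+,-./:;<=>?@[\\]^_`{|}~".toList

-- ===== PORT A =====
-- findall: the generator 'yield'ing match positions; fuel = t.length + 1 - start bounds the loop
-- (each step strictly increases start; fuel never runs out on the calls below).
def findallAux (t p : List Char) (start : Nat) (fuel : Nat) (check_end : Bool) : List Int :=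
  match fuel with
  | 0 => []                                         -- unreachable with fuel = t.length + 1 - start
  | fuel + 1 =>
    let i := PySem.Chars.findFrom t p (start : Int) none
    if i = -1 then []
    else
      let rest := findallAux t p (i.toNat + 1) fuel check_end
      if check_end then
        -- text[i+phrase_length]: 'none' = IndexError in Python; unreachable from censor_after_two (check_end is always False there)
        match PySem.List.pyGet? t (i + p.length) with
        | some phrase_end =>
          if phrase_end ∈ pvPunct ∨ phrase_end = ' ' ∨ phrase_end = '\n' then i :: rest else rest
        | none => rest
      else i :: rest

def findall (t p : List Char) (check_end : Bool) : List Int :=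
  findallAux t p 0 (t.length + 1) check_end

def censorA (t : List Char) : List Char :=
  t.foldl (fun new_text c =>
    if c = ' ' then new_text ++ [' ']
    else if c = '\n' then new_text ++ ['\n']
    else if c ∈ pvPunct then new_text ++ [c]
    else new_text ++ ['#']) []

def censor_after_two (text : String) (phrase_list : List String) : String :=
  let textL := text.toList
  let text_casefold := PySem.Chars.lower textL      -- casefold = lower on the ASCII domain
  let index_list : List Int := phrase_list.foldl (fun index_list phrase =>
      (findall text_casefold (PySem.Chars.lower phrase.toList) false).foldl
        (fun index_list start_index =>
          if 0 ≤ start_index then index_list ++ [start_index + (phrase.toList.length : Int)] else index_list)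
        index_list) []
  let sortedList := PySem.List.sorted index_list id
  match sortedList with
  | [] => text
  | [_] => text   -- Python: index_list[1] raises IndexError here; outside Pre_
  | _ :: i1 :: _ =>
    let untouched_text := PySem.List.slice textL none (some i1)
    let censored_text := PySem.List.slice textL (some i1) none
    let ctcf := PySem.Chars.lower censored_text
    let censored := phrase_list.foldl (fun ct phrase =>
        (findall ctcf (PySem.Chars.lower phrase.toList) false).foldl
          (fun ct start_index =>
            let end_index := start_index + (phrase.toList.length : Int)
            if 0 < start_index then
              PySem.List.slice ct none (some start_index) ++
                censorA (PySem.List.slice ct (some start_index) (some end_index)) ++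
                PySem.List.slice ct (some end_index) none
            else ct)
          ct) censored_text
    String.ofList (untouched_text ++ censored)

-- ===== PORT B =====
-- _KEEP = set(" \n" + string.punctuation)
def pvKeep : PySem.Set Char := PySem.Set.ofList (' ' :: '\n' :: pvPunct)

-- the find-loop of B collecting (start, end) spans; same fuel bound as above
def spansAux (t p : List Char) (plen : Nat) (start : Nat) (fuel : Nat) : List (Int × Int) :=
  match fuel with
  | 0 => []                                         -- unreachable with fuel = t.length + 1 - start
  | fuel + 1 =>
    let i := PySem.Chars.findFrom t p (start : Int) none
    if i = -1 then []
    else (i, i + plen) :: spansAux t p plen (i.toNat + 1) fuel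

def censor_after_two_alt (text : String) (phrase_list : List String) : String :=
  let textL := text.toList
  let folded := PySem.Chars.lower textL             -- casefold = lower on the ASCII domain
  let spans := phrase_list.foldl (fun spans phrase =>
      spans ++ spansAux folded (PySem.Chars.lower phrase.toList) phrase.toList.length 0 (folded.length + 1)) []
  let ends := PySem.List.sorted (spans.map (fun sp => sp.2)) id
  match ends with
  | [] => text
  | [_] => text                                     -- len(ends) < 2: return text
  | _ :: cut :: _ =>
    -- mask[j] = 1 for every position of a span strictly after the cut (indices are in range: spans lie inside the text)
    let mask := spans.foldl (fun mask sp =>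
        if cut < sp.1 then
          (PySem.List.pyRange sp.1 sp.2).foldl (fun mask j => mask.set j.toNat true) mask
        else mask) (List.replicate textL.length false)
    String.ofList ((PySem.List.enumerate textL).map (fun jc =>
      if PySem.List.pyGetD mask jc.1 false && !(pvKeep.contains jc.2) then '#' else jc.2))

-- ===== PRECONDITION & SPEC =====
-- the end position of every (casefolded) occurrence of every phrase in the text, one entry per occurrence
def pvOccEnds (text : String) (phrase_list : List String) : List Nat :=
  phrase_list.flatMap (fun ph =>
    ((List.range (text.toList.length + 1)).filter (fun i =>
        decide (PySem.Chars.lower ph.toList <+: (PySem.Chars.lower text.toList).drop i))).map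
      (fun i => i + ph.toList.length))

-- Pre_ excludes exactly the inputs with ONE phrase occurrence in total, on which A raises IndexError (index_list[1]).
def Pre_censor_after_two (text : String) (phrase_list : List String) : Prop :=
  (pvOccEnds text phrase_list).length ≠ 1
instance (text : String) (phrase_list : List String) : Decidable (Pre_censor_after_two text phrase_list) := by
  unfold Pre_censor_after_two; infer_instance

def pvWitness_censor_after_two : String × List String := ("Aa bc aaron", ["a"])

-- When the phrases have exactly one occurrence in total, A raises IndexError on index_list[1]; B returns the text unchanged.
def Raises_censor_after_two (text : String) (phrase_list : List String) : Prop :=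
  (pvOccEnds text phrase_list).length = 1
instance (text : String) (phrase_list : List String) : Decidable (Raises_censor_after_two text phrase_list) := by
  unfold Raises_censor_after_two; infer_instance
def pvRaiseWitness_censor_after_two : String × List String := ("hello", ["ell"])
def pvRaiseWitnessOut_censor_after_two : String := "hello"

def Spec_censor_after_two (text : String) (phrase_list : List String) (out : String) : Prop := out = censor_after_two_alt text phrase_list
instance (text : String) (phrase_list : List String) (out : String) : Decidable (Spec_censor_after_two text phrase_list out) := by unfold Spec_censor_after_two; infer_instance

-- ===== CLAIM (what is proved, stated in full; the proofs are below) =====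
def Claim_equal_censor_after_two : Prop := ∀ (text : String) (phrase_list : List String), Dom_censor_after_two text phrase_list → Pre_censor_after_two text phrase_list → Spec_censor_after_two text phrase_list (censor_after_two text phrase_list)

def Claim_raises_censor_after_two : Prop := (∀ (text : String) (phrase_list : List String), Dom_censor_after_two text phrase_list → Raises_censor_after_two text phrase_list → ¬ Pre_censor_after_two text phrase_list) ∧ (Dom_censor_after_two (pvRaiseWitness_censor_after_two.1) (pvRaiseWitness_censor_after_two.2) ∧ Raises_censor_after_two (pvRaiseWitness_censor_after_two.1) (pvRaiseWitness_censor_after_two.2) ∧ censor_after_two_alt (pvRaiseWitness_censor_after_two.1) (pvRaiseWitness_censor_after_two.2) = pvRaiseWitnessOut_censor_after_two)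

-- ===== LEMMAS AND PROOFS =====

-- used by the ports' fuel bound: a find start past the end returns -1
theorem pvFindFrom_past (t p : List Char) (k : Nat) (hk : t.length < k) :
    PySem.Chars.findFrom t p (k : Int) none = -1 := by
  simp [PySem.Chars.findFrom]
  omega


-- the canonical sorted list of match positions i ≥ k of p in t (one per occurrence)
def pvOcc (t p : List Char) (k : Nat) : List Nat :=
  (List.range (t.length + 1)).filter (fun i => decide (k ≤ i) && decide (p <+: t.drop i))

theorem pvFilter_nil (N k : Nat) (Q : Nat → Bool) (h : ∀ i, k ≤ i → i < N → Q i = false) :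
    (List.range N).filter (fun i => decide (k ≤ i) && Q i) = [] := by
  refine List.filter_eq_nil_iff.mpr ?_
  intro a ha
  rw [List.mem_range] at ha
  by_cases hk : k ≤ a
  · simp [hk, h a hk ha]
  · simp [hk]

theorem pvFilter_cons (N k i0 : Nat) (Q : Nat → Bool) (h0 : Q i0 = true) (hk : k ≤ i0) (hN : i0 < N)
    (hmin : ∀ i, k ≤ i → i < i0 → Q i = false) :
    (List.range N).filter (fun i => decide (k ≤ i) && Q i)
      = i0 :: (List.range N).filter (fun i => decide (i0 + 1 ≤ i) && Q i) := by
  have hsplit : List.range N = List.range (i0 + 1) ++ List.range' (i0 + 1) (N - (i0 + 1)) := by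
    have h1 := @List.range'_append 0 (i0 + 1) (N - (i0 + 1)) 1
    simp only [Nat.one_mul, Nat.zero_add] at h1
    have h2 : i0 + 1 + (N - (i0 + 1)) = N := by omega
    rw [h2] at h1
    rw [List.range_eq_range', List.range_eq_range', ← h1]
  have hcongr : ∀ x ∈ List.range' (i0 + 1) (N - (i0 + 1)),
      (decide (k ≤ x) && Q x) = (decide (i0 + 1 ≤ x) && Q x) := by
    intro x hx
    rw [List.mem_range'] at hx
    obtain ⟨i, -, rfl⟩ := hx
    have hx1 : k ≤ i0 + 1 + i := by omega
    have hx2 : i0 + 1 ≤ i0 + 1 + i := by omega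
    simp [hx1, hx2]
  have hfirst1 : (List.range (i0 + 1)).filter (fun i => decide (k ≤ i) && Q i) = [i0] := by
    rw [List.range_succ, List.filter_append]
    rw [pvFilter_nil i0 k Q (fun i hki hii => hmin i hki hii)]
    simp [hk, h0]
  have hfirst2 : (List.range (i0 + 1)).filter (fun i => decide (i0 + 1 ≤ i) && Q i) = [] := by
    refine List.filter_eq_nil_iff.mpr ?_
    intro a ha
    rw [List.mem_range] at ha
    simp [show ¬ (i0 + 1 ≤ a) by omega]
  rw [hsplit, List.filter_append, List.filter_append, hfirst1, hfirst2,
    List.filter_congr hcongr]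
  rfl

-- p occurs at some i ≥ k in t iff it is an infix of t.drop k
theorem pvInfix_drop (t p : List Char) (k i : Nat) (hki : k ≤ i) (hp : p <+: t.drop i) :
    p <:+: t.drop k := by
  rw [← PySem.Chars.isIn_iff_infix, ← PySem.Chars.exists_prefix_drop_iff_isIn]
  exact ⟨i - k, by rwa [List.drop_drop, show k + (i - k) = i by omega]⟩

theorem pvFindallAux_eq (t p : List Char) (fuel : Nat) : ∀ (k : Nat), t.length + 1 ≤ fuel + k →
    findallAux t p k fuel false = (pvOcc t p k).map (fun (i : Nat) => (i : Int)) := by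
  induction fuel with
  | zero =>
    intro k hf
    rw [findallAux, pvOcc, pvFilter_nil _ _ _ (fun i h1 h2 => by omega)]
    rfl
  | succ fuel ih =>
    intro k hf
    rw [findallAux]
    by_cases hk : k ≤ t.length
    · by_cases hneg : PySem.Chars.findFrom t p (k : Int) none = -1
      · rw [if_pos hneg, pvOcc, pvFilter_nil _ _ _ ?_]
        · rfl
        · intro i h1 h2
          refine decide_eq_false (fun hp => ?_)
          exact (PySem.Chars.findFrom_natCast_eq_neg_one_iff t p k hk).mp hneg
            (pvInfix_drop t p k i h1 hp)
      · rw [if_neg hneg]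
        simp only [Bool.false_eq_true, reduceIte]
        have hsp := PySem.Chars.findFrom_natCast_spec t p k hk hneg
        have hnn : 0 ≤ PySem.Chars.findFrom t p (k : Int) none :=
          le_trans (by exact_mod_cast Nat.zero_le k) hsp.1
        have heq := PySem.Chars.findFrom_natCast t p k hk
        have hfl := PySem.Chars.find_le_length (t.drop k) p
        rw [List.length_drop] at hfl
        have hle : (PySem.Chars.findFrom t p (k : Int) none).toNat ≤ t.length := by
          by_cases hfind : PySem.Chars.find (t.drop k) p = -1
          · rw [heq, if_pos hfind] at hneg
            exact absurd rfl hneg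
          · rw [heq, if_neg hfind]
            omega
        have hocc : pvOcc t p k
            = (PySem.Chars.findFrom t p (k : Int) none).toNat
              :: pvOcc t p ((PySem.Chars.findFrom t p (k : Int) none).toNat + 1) := by
          rw [pvOcc, pvOcc]
          refine pvFilter_cons _ _ _ _ (decide_eq_true hsp.2.1) (by have := hsp.1; omega)
            (by omega) ?_
          intro i h1 h2
          exact decide_eq_false (hsp.2.2 i h1 h2)
        rw [hocc, List.map_cons, ih _ (by have := hsp.1; omega)]
        congr 1
        exact (Int.toNat_of_nonneg hnn).symm
    · rw [if_pos (pvFindFrom_past t p k (by omega)), pvOcc,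
        pvFilter_nil _ _ _ (fun i h1 h2 => by omega)]
      rfl

theorem pvFindall_eq (t p : List Char) :
    findall t p false = (pvOcc t p 0).map (fun (i : Nat) => (i : Int)) := by
  rw [findall, pvFindallAux_eq t p (t.length + 1) 0 (by omega)]

theorem pvSpansAux_eq (t p : List Char) (plen : Nat) (fuel : Nat) : ∀ (k : Nat),
    spansAux t p plen k fuel = (findallAux t p k fuel false).map (fun i => (i, i + (plen : Int))) := by
  induction fuel with
  | zero => intro k; rw [spansAux, findallAux]; rfl
  | succ fuel ih =>
    intro k
    rw [spansAux, findallAux]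
    by_cases hneg : PySem.Chars.findFrom t p (k : Int) none = -1
    · rw [if_pos hneg, if_pos hneg]; rfl
    · rw [if_neg hneg, if_neg hneg]
      simp only [Bool.false_eq_true, reduceIte, List.map_cons]
      rw [ih]

theorem pvSpans_eq (t p : List Char) (plen : Nat) :
    spansAux t p plen 0 (t.length + 1)
      = (pvOcc t p 0).map (fun (i : Nat) => ((i : Int), (i : Int) + (plen : Int))) := by
  rw [pvSpansAux_eq, pvFindallAux_eq t p _ 0 (by omega), List.map_map]
  rfl

-- pointwise description of the splicing loop
def pvCensorChar (c : Char) : Char :=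
  if c = ' ' then ' ' else if c = '\n' then '\n' else if c ∈ pvPunct then c else '#'

def pvMix (P : Nat → Bool) (l : List Char) : List Char :=
  l.mapIdx (fun j c => if P j then pvCensorChar c else c)

def pvCov (sp : Int × Nat) (j : Nat) : Bool :=
  decide (0 < sp.1 ∧ sp.1 ≤ (j : Int) ∧ (j : Int) < sp.1 + sp.2)

def pvSpliceStep (ct : List Char) (sp : Int × Nat) : List Char :=
  if 0 < sp.1 then
    PySem.List.slice ct none (some sp.1) ++
      censorA (PySem.List.slice ct (some sp.1) (some (sp.1 + (sp.2 : Int)))) ++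
      PySem.List.slice ct (some (sp.1 + (sp.2 : Int))) none
  else ct

theorem pvCensorA_eq_map (t : List Char) : censorA t = t.map pvCensorChar := by
  have hfun : (fun (new_text : List Char) c =>
      if c = ' ' then new_text ++ [' ']
      else if c = '\n' then new_text ++ ['\n']
      else if c ∈ pvPunct then new_text ++ [c]
      else new_text ++ ['#']) = fun (acc : List Char) c => acc ++ [pvCensorChar c] := by
    funext acc c
    rw [pvCensorChar]
    split_ifs <;> rfl
  rw [censorA, hfun, PySem.List.foldl_append_singleton_eq_map, List.nil_append]

theorem pvCensorChar_idem (c : Char) : pvCensorChar (pvCensorChar c) = pvCensorChar c := by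
  rw [pvCensorChar, pvCensorChar]
  split_ifs with h1 h2 h3 <;> simp_all

theorem pvLength_mix (P : Nat → Bool) (l : List Char) : (pvMix P l).length = l.length := by
  simp [pvMix]

theorem pvGetElem_mix (P : Nat → Bool) (l : List Char) (j : Nat) (h : j < (pvMix P l).length) :
    (pvMix P l)[j] = if P j then pvCensorChar (l[j]'(by simpa [pvMix] using h)) else l[j]'(by simpa [pvMix] using h) := by
  simp [pvMix]

theorem pvMix_false (l : List Char) : pvMix (fun _ => false) l = l := by
  apply List.ext_getElem
  · simp [pvMix]
  · intro j h1 h2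
    simp [pvMix]

theorem pvSpliceStep_mix (P : Nat → Bool) (l : List Char) (sp : Int × Nat)
    (hnn : 0 ≤ sp.1) (hb : sp.1.toNat + sp.2 ≤ l.length) :
    pvSpliceStep (pvMix P l) sp = pvMix (fun j => P j || pvCov sp j) l := by
  obtain ⟨sfst, ssnd⟩ := sp
  simp only at hnn hb ⊢
  by_cases h1 : 0 < sfst
  · obtain ⟨s1, rfl⟩ : ∃ s1 : Nat, sfst = (s1 : Int) := ⟨sfst.toNat, (Int.toNat_of_nonneg hnn).symm⟩
    rw [pvSpliceStep]
    dsimp only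
    rw [if_pos h1, PySem.List.slice_to_natCast, PySem.List.slice_natCast_add,
      pvCensorA_eq_map]
    have hcast : (s1 : Int) + (ssnd : Int) = ((s1 + ssnd : Nat) : Int) := by push_cast; ring
    rw [hcast, PySem.List.slice_from_natCast]
    have hs1 : s1 + ssnd ≤ l.length := by omega
    have hl1 : (List.take s1 (pvMix P l)).length = s1 := by
      simp [pvLength_mix]
      omega
    have hl2 : (List.map pvCensorChar (List.take ssnd (List.drop s1 (pvMix P l)))).length = ssnd := by
      simp [pvLength_mix]
      omega
    apply List.ext_getElem
    · simp [pvLength_mix]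
      omega
    · intro j hj1 hj2
      have hjl : j < l.length := by
        simpa [pvLength_mix] using hj2
      by_cases hcase1 : j < s1
      · rw [List.getElem_append_left (by rw [List.length_append, hl1, hl2]; omega),
          List.getElem_append_left (by rw [hl1]; omega),
          List.getElem_take, pvGetElem_mix, pvGetElem_mix]
        have hcov : pvCov ((s1 : Int), ssnd) j = false := by
          simp [pvCov]
          intro
          omega
        rw [hcov, Bool.or_false]
      · by_cases hcase2 : j < s1 + ssnd
        · rw [List.getElem_append_left (by rw [List.length_append, hl1, hl2]; omega),
            List.getElem_append_right (by rw [hl1]; omega)]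
          rw [List.getElem_map, List.getElem_take, List.getElem_drop, pvGetElem_mix, pvGetElem_mix]
          have hidx : s1 + (j - (List.take s1 (pvMix P l)).length) = j := by rw [hl1]; omega
          have hcov : pvCov ((s1 : Int), ssnd) j = true := by
            simp [pvCov]
            omega
          rw [hcov, Bool.or_true]
          simp only [hidx]
          split
          · exact pvCensorChar_idem _
          · rfl
        · rw [List.getElem_append_right (by rw [List.length_append, hl1, hl2]; omega),
            List.getElem_drop, pvGetElem_mix, pvGetElem_mix]
          have hidx : s1 + ssnd + (j - (List.take s1 (pvMix P l) ++ List.map pvCensorChar (List.take ssnd (List.drop s1 (pvMix P l)))).length) = j := by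
            rw [List.length_append, hl1, hl2]
            omega
          have hcov : pvCov ((s1 : Int), ssnd) j = false := by
            simp [pvCov]
            intro _ _
            omega
          rw [hcov, Bool.or_false]
          simp only [hidx]
  · rw [pvSpliceStep]
    dsimp only
    rw [if_neg h1]
    have hfun : (fun j => P j || pvCov (sfst, ssnd) j) = P := by
      funext j
      have hcov : pvCov (sfst, ssnd) j = false := by
        simp [pvCov]
        intro
        omega
      rw [hcov, Bool.or_false]
    rw [hfun]

theorem pvFoldl_spliceStep (SP : List (Int × Nat)) (l : List Char) :
    ∀ (P : Nat → Bool), (∀ sp ∈ SP, 0 ≤ sp.1 ∧ sp.1.toNat + sp.2 ≤ l.length) →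
    List.foldl pvSpliceStep (pvMix P l) SP
      = pvMix (fun j => P j || SP.any (fun sp => pvCov sp j)) l := by
  induction SP with
  | nil => intro P _; simp
  | cons hd tl ih =>
    intro P hb
    rw [List.foldl_cons, pvSpliceStep_mix P l hd (hb hd (by simp)).1 (hb hd (by simp)).2,
      ih _ (fun sp hsp => hb sp (by simp [hsp]))]
    congr 1
    funext j
    simp [Bool.or_assoc]

-- mask lemmas (B side)
theorem pvSetFold (L : List Int) : ∀ (m : List Bool), (∀ x ∈ L, 0 ≤ x) → ∀ (j : Nat),
    (List.foldl (fun (m : List Bool) (x : Int) => m.set x.toNat true) m L)[j]?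
      = m[j]?.map (fun b => b || L.any (fun x => decide (x = (j : Int)))) := by
  induction L with
  | nil =>
    intro m _ j
    cases hm : m[j]? <;> simp [hm]
  | cons hd tl ih =>
    intro m hnn j
    rw [List.foldl_cons, ih _ (fun x hx => hnn x (List.mem_cons_of_mem _ hx)) j,
      List.getElem?_set]
    have h0 : 0 ≤ hd := hnn hd List.mem_cons_self
    by_cases hc : hd.toNat = j
    · have hdj : hd = (j : Int) := by omega
      rw [if_pos hc]
      by_cases hlen : hd.toNat < m.length
      · rw [if_pos hlen]
        have hj : m[j]? = some (m[j]'(hc ▸ hlen)) := List.getElem?_eq_getElem (hc ▸ hlen)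
        rw [hj]
        simp [hdj]
      · rw [if_neg hlen]
        have hj : m[j]? = none := List.getElem?_eq_none (by omega)
        rw [hj]
        simp
    · rw [if_neg hc]
      have hne : (hd = (j : Int)) = False := by simp; omega
      cases hm : m[j]? <;> simp [hne]

theorem pvRangeSet (s e : Int) (hs : 0 ≤ s) (m : List Bool) (j : Nat) :
    (List.foldl (fun (m : List Bool) (x : Int) => m.set x.toNat true) m (PySem.List.pyRange s e))[j]?
      = m[j]?.map (fun b => b || decide (s ≤ (j : Int) ∧ (j : Int) < e)) := by
  rw [pvSetFold _ _ (fun x hx => by have := PySem.List.mem_pyRange_one.mp hx; omega) j]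
  have hany : (PySem.List.pyRange s e).any (fun x => decide (x = (j : Int)))
      = decide (s ≤ (j : Int) ∧ (j : Int) < e) := by
    rw [Bool.eq_iff_iff]
    simp only [List.any_eq_true, PySem.List.mem_pyRange_one, decide_eq_true_eq]
    constructor
    · rintro ⟨x, hx, rfl⟩
      exact hx
    · intro h
      exact ⟨(j : Int), h, rfl⟩
  rw [hany]

theorem pvMaskFold (cut : Int) (SP : List (Int × Int)) : ∀ (m : List Bool) (j : Nat),
    (∀ sp ∈ SP, 0 ≤ sp.1) →
    (List.foldl (fun (m : List Bool) (sp : Int × Int) =>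
        if cut < sp.1 then
          List.foldl (fun (m : List Bool) (x : Int) => m.set x.toNat true) m (PySem.List.pyRange sp.1 sp.2)
        else m) m SP)[j]?
      = m[j]?.map (fun b => b || SP.any (fun sp => decide (cut < sp.1 ∧ sp.1 ≤ (j : Int) ∧ (j : Int) < sp.2))) := by
  induction SP with
  | nil =>
    intro m j _
    cases hm : m[j]? <;> simp [hm]
  | cons hd tl ih =>
    intro m j hnn
    rw [List.foldl_cons]
    by_cases hcut : cut < hd.1
    · rw [if_pos hcut, ih _ j (fun sp hsp => hnn sp (List.mem_cons_of_mem _ hsp)),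
        pvRangeSet hd.1 hd.2 (hnn hd List.mem_cons_self) m j]
      cases hm : m[j]? <;> simp [hcut, Bool.or_assoc]
    · rw [if_neg hcut, ih _ j (fun sp hsp => hnn sp (List.mem_cons_of_mem _ hsp))]
      cases hm : m[j]? <;> simp [hcut]

theorem pvLength_lower (l : List Char) : (PySem.Chars.lower l).length = l.length := by
  simp [PySem.Chars.lower]

theorem pvLower_drop (l : List Char) (k : Nat) :
    PySem.Chars.lower (l.drop k) = (PySem.Chars.lower l).drop k := by
  simp [PySem.Chars.lower]

-- the end positions (as integers), per phrase in order
def pvEnds (tcf : List Char) (pl : List String) : List Int :=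
  pl.flatMap (fun ph => (pvOcc tcf (PySem.Chars.lower ph.toList) 0).map
    (fun (i : Nat) => (i : Int) + (ph.toList.length : Int)))

theorem pvIndexList_eq (tcf : List Char) (pl : List String) :
    pl.foldl (fun index_list phrase =>
      (findall tcf (PySem.Chars.lower phrase.toList) false).foldl
        (fun index_list start_index =>
          if 0 ≤ start_index then index_list ++ [start_index + (phrase.toList.length : Int)]
          else index_list)
        index_list) []
    = pvEnds tcf pl := by
  have hfun : (fun (index_list : List Int) (phrase : String) =>
      (findall tcf (PySem.Chars.lower phrase.toList) false).foldl
        (fun index_list start_index =>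
          if 0 ≤ start_index then index_list ++ [start_index + (phrase.toList.length : Int)]
          else index_list)
        index_list)
      = fun (acc : List Int) (ph : String) =>
        acc ++ (pvOcc tcf (PySem.Chars.lower ph.toList) 0).map
          (fun (i : Nat) => (i : Int) + (ph.toList.length : Int)) := by
    funext acc ph
    rw [pvFindall_eq, List.foldl_map]
    have hin : (fun (il : List Int) (i : Nat) =>
        if 0 ≤ (i : Int) then il ++ [(i : Int) + (ph.toList.length : Int)] else il)
        = fun (il : List Int) (i : Nat) => il ++ [(i : Int) + (ph.toList.length : Int)] := by
      funext il i
      rw [if_pos (by omega)]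
    rw [hin, PySem.List.foldl_append_singleton_eq_map]
  rw [hfun, PySem.List.foldl_append_eq_flatMap, List.nil_append, pvEnds]

theorem pvSpansList_eq (folded : List Char) (pl : List String) :
    pl.foldl (fun spans phrase =>
      spans ++ spansAux folded (PySem.Chars.lower phrase.toList) phrase.toList.length 0 (folded.length + 1)) []
    = pl.flatMap (fun ph => (pvOcc folded (PySem.Chars.lower ph.toList) 0).map
        (fun (i : Nat) => ((i : Int), (i : Int) + (ph.toList.length : Int)))) := by
  rw [PySem.List.foldl_append_eq_flatMap, List.nil_append]
  congr 1
  funext ph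
  exact pvSpans_eq folded (PySem.Chars.lower ph.toList) ph.toList.length

theorem pvSpans_map_snd (folded : List Char) (pl : List String) :
    (pl.flatMap (fun ph => (pvOcc folded (PySem.Chars.lower ph.toList) 0).map
        (fun (i : Nat) => ((i : Int), (i : Int) + (ph.toList.length : Int))))).map (fun sp => sp.2)
    = pvEnds folded pl := by
  rw [List.map_flatMap, pvEnds]
  congr 1
  funext ph
  rw [List.map_map]
  rfl

theorem pvEnds_eq_occEnds (text : String) (pl : List String) :
    pvEnds (PySem.Chars.lower text.toList) pl = (pvOccEnds text pl).map (fun (i : Nat) => (i : Int)) := by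
  rw [pvEnds, pvOccEnds, List.map_flatMap]
  congr 1
  funext ph
  rw [List.map_map, pvOcc, pvLength_lower]
  have hg : ((List.range (text.toList.length + 1)).filter (fun i =>
      decide (0 ≤ i) && decide (PySem.Chars.lower ph.toList <+: (PySem.Chars.lower text.toList).drop i)))
      = ((List.range (text.toList.length + 1)).filter (fun i =>
      decide (PySem.Chars.lower ph.toList <+: (PySem.Chars.lower text.toList).drop i))) := by
    apply List.filter_congr
    intro x _
    simp
  rw [hg]
  apply List.map_congr_left
  intro i _
  simp only [Function.comp_apply]
  push_cast
  ring

theorem pvEnds_bounds (tcf : List Char) (pl : List String) (x : Int) (hx : x ∈ pvEnds tcf pl) :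
    0 ≤ x ∧ x ≤ tcf.length := by
  rw [pvEnds, List.mem_flatMap] at hx
  obtain ⟨ph, hph, hmem⟩ := hx
  rw [List.mem_map] at hmem
  obtain ⟨i, hi, rfl⟩ := hmem
  rw [pvOcc, List.mem_filter, List.mem_range] at hi
  have hpre : PySem.Chars.lower ph.toList <+: tcf.drop i := by
    have := hi.2
    simp at this
    exact this
  have hlen := List.IsPrefix.length_le hpre
  rw [List.length_drop, pvLength_lower] at hlen
  have hrange := hi.1
  constructor <;> omega

theorem pvCensorChar_keep (c : Char) : pvCensorChar c = if pvKeep.contains c then c else '#' := by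
  by_cases hc : c ∈ (' ' :: '\n' :: pvPunct)
  · have hk : pvKeep.contains c = true :=
      (PySem.Set.contains_iff _ _).mpr ((PySem.Set.mem_ofList _ _).mpr hc)
    rw [hk, if_pos rfl, pvCensorChar]
    split_ifs with h1 h2 h3
    · exact h1.symm
    · exact h2.symm
    · rfl
    · simp only [List.mem_cons] at hc
      tauto
  · have hk : pvKeep.contains c = false := by
      cases hcc : pvKeep.contains c
      · rfl
      · exact absurd ((PySem.Set.mem_ofList _ _).mp ((PySem.Set.contains_iff _ _).mp hcc)) hc
    rw [hk, pvCensorChar]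
    simp only [List.mem_cons] at hc
    push Not at hc
    rw [if_neg hc.1, if_neg hc.2.1, if_neg (by simpa using hc.2.2)]
    rfl

-- membership in pvOcc, unfolded
theorem pvMem_occ (t p : List Char) (i : Nat) :
    i ∈ pvOcc t p 0 ↔ i ≤ t.length ∧ p <+: t.drop i := by
  rw [pvOcc, List.mem_filter, List.mem_range]
  simp

theorem pvFinish (B : Bool) (c : Char) :
    (if B = true then pvCensorChar c else c) = (if (B && !pvKeep.contains c) = true then '#' else c) := by
  cases B
  · simp
  · rw [pvCensorChar_keep]
    cases hk : pvKeep.contains c <;> simp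

theorem pv_main : ∀ (text : String) (phrase_list : List String), Pre_censor_after_two text phrase_list → censor_after_two text phrase_list = censor_after_two_alt text phrase_list := by
  intro text pl hpre
  have hlen_pre : (pvEnds (PySem.Chars.lower text.toList) pl).length = (pvOccEnds text pl).length := by
    rw [pvEnds_eq_occEnds, List.length_map]
  rw [censor_after_two, censor_after_two_alt]
  simp only []
  rw [pvIndexList_eq, pvSpansList_eq, pvSpans_map_snd]
  rcases hS : PySem.List.sorted (pvEnds (PySem.Chars.lower text.toList) pl) id with - | ⟨h0, - | ⟨i1, rest⟩⟩
  · rfl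
  · exfalso
    apply hpre
    have hlen1 := congrArg List.length hS
    rw [PySem.List.length_sorted, List.length_cons, List.length_nil] at hlen1
    show (pvOccEnds text pl).length = 1
    rw [← hlen_pre]
    exact hlen1
  · -- the main case: at least two occurrence ends
    have hperm : (h0 :: i1 :: rest).Perm (pvEnds (PySem.Chars.lower text.toList) pl) := by
      rw [← hS]
      exact PySem.List.sorted_perm _ _ _
    have hmem : i1 ∈ pvEnds (PySem.Chars.lower text.toList) pl :=
      hperm.mem_iff.mp (by simp)
    have hb := pvEnds_bounds _ _ _ hmem
    rw [pvLength_lower] at hb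
    obtain ⟨cut, rfl⟩ : ∃ c : Nat, i1 = (c : Int) := ⟨i1.toNat, (Int.toNat_of_nonneg hb.1).symm⟩
    have hcut : cut ≤ text.toList.length := by
      have := hb.2
      omega
    dsimp only
    rw [PySem.List.slice_to_natCast, PySem.List.slice_from_natCast, pvLower_drop]
    -- the A-side spans (relative to the tail) as pairs (start, phrase length)
    have hstep : ∀ (ct : List Char) (phrase : String),
        (findall ((PySem.Chars.lower text.toList).drop cut) (PySem.Chars.lower phrase.toList) false).foldl
          (fun ct start_index =>
            let end_index := start_index + (phrase.toList.length : Int)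
            if 0 < start_index then
              PySem.List.slice ct none (some start_index) ++
                censorA (PySem.List.slice ct (some start_index) (some end_index)) ++
                PySem.List.slice ct (some end_index) none
            else ct) ct
        = List.foldl pvSpliceStep ct
            ((pvOcc ((PySem.Chars.lower text.toList).drop cut) (PySem.Chars.lower phrase.toList) 0).map
              (fun (i : Nat) => ((i : Int), phrase.toList.length))) := by
      intro ct phrase
      rw [pvFindall_eq, List.foldl_map, List.foldl_map]
      rfl
    have hA : pl.foldl (fun ct phrase =>
        (findall ((PySem.Chars.lower text.toList).drop cut) (PySem.Chars.lower phrase.toList) false).foldl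
          (fun ct start_index =>
            let end_index := start_index + (phrase.toList.length : Int)
            if 0 < start_index then
              PySem.List.slice ct none (some start_index) ++
                censorA (PySem.List.slice ct (some start_index) (some end_index)) ++
                PySem.List.slice ct (some end_index) none
            else ct) ct) (text.toList.drop cut)
        = List.foldl pvSpliceStep (text.toList.drop cut)
            (pl.flatMap (fun ph =>
              (pvOcc ((PySem.Chars.lower text.toList).drop cut) (PySem.Chars.lower ph.toList) 0).map
                (fun (i : Nat) => ((i : Int), ph.toList.length)))) := by
      rw [List.foldl_flatMap]
      congr 1
      funext ct ph
      exact hstep ct ph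
    rw [hA]
    have hbounds : ∀ sp ∈ pl.flatMap (fun ph =>
        (pvOcc ((PySem.Chars.lower text.toList).drop cut) (PySem.Chars.lower ph.toList) 0).map
          (fun (i : Nat) => ((i : Int), ph.toList.length))),
        0 ≤ sp.1 ∧ sp.1.toNat + sp.2 ≤ (text.toList.drop cut).length := by
      intro sp hsp
      rw [List.mem_flatMap] at hsp
      obtain ⟨ph, -, hsp⟩ := hsp
      rw [List.mem_map] at hsp
      obtain ⟨i, hi, rfl⟩ := hsp
      rw [pvMem_occ] at hi
      have hplen := List.IsPrefix.length_le hi.2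
      rw [List.length_drop, List.length_drop, pvLength_lower, pvLength_lower] at *
      constructor
      · simp
      · simp only [Int.toNat_natCast]
        omega
    rw [show text.toList.drop cut
        = pvMix (fun _ => false) (text.toList.drop cut) from (pvMix_false _).symm,
      pvFoldl_spliceStep _ _ _ hbounds]
    -- B side: the mask
    apply congrArg String.ofList
    apply List.ext_getElem
    · rw [List.length_append, List.length_take, pvLength_mix, List.length_drop,
        List.length_map, PySem.List.length_enumerate]
      omega
    · intro j hj1 hj2
      have hjn : j < text.toList.length := by
        simpa [PySem.List.length_enumerate] using hj2
      rw [List.getElem_map, PySem.List.getElem_enumerate]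
      simp only [Int.zero_add]
      -- mask bit at j
      rw [PySem.List.pyGetD_natCast, List.getD_eq_getElem?_getD,
        pvMaskFold _ _ _ _ ?hnn]
      case hnn =>
        intro sp hsp
        rw [List.mem_flatMap] at hsp
        obtain ⟨ph, -, hsp⟩ := hsp
        rw [List.mem_map] at hsp
        obtain ⟨i, -, rfl⟩ := hsp
        simp
      rw [List.getElem?_replicate, if_pos hjn]
      simp only [Option.map_some, Option.getD_some, Bool.false_or]
      -- case split: before / after the cut
      by_cases hjcut : j < cut
      · rw [List.getElem_append_left (by rw [List.length_take]; omega), List.getElem_take]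
        have hmask : (pl.flatMap (fun ph =>
            (pvOcc (PySem.Chars.lower text.toList) (PySem.Chars.lower ph.toList) 0).map
              (fun (i : Nat) => ((i : Int), (i : Int) + (ph.toList.length : Int))))).any
            (fun sp => decide ((cut : Int) < sp.1 ∧ sp.1 ≤ (j : Int) ∧ (j : Int) < sp.2)) = false := by
          rw [List.any_eq_false]
          intro sp hsp
          simp only [decide_eq_true_eq, not_and]
          intro hlt hle
          omega
        rw [hmask]
        simp
      · rw [List.getElem_append_right (by rw [List.length_take]; omega)]
        have hidx : j - (List.take cut text.toList).length = j - cut := by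
          rw [List.length_take]
          omega
        simp only [hidx]
        rw [pvGetElem_mix]
        have hdropidx : (text.toList.drop cut)[j - cut]'(by rw [List.length_drop]; omega)
            = text.toList[j]'hjn := by
          rw [List.getElem_drop]
          congr 1
          omega
        rw [hdropidx]
        -- the two coverage bits agree
        have hcov : (fun j' => false || (pl.flatMap (fun ph =>
              (pvOcc ((PySem.Chars.lower text.toList).drop cut) (PySem.Chars.lower ph.toList) 0).map
                (fun (i : Nat) => ((i : Int), ph.toList.length)))).any (fun sp => pvCov sp j')) (j - cut)
            = (pl.flatMap (fun ph =>
              (pvOcc (PySem.Chars.lower text.toList) (PySem.Chars.lower ph.toList) 0).map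
                (fun (i : Nat) => ((i : Int), (i : Int) + (ph.toList.length : Int))))).any
              (fun sp => decide ((cut : Int) < sp.1 ∧ sp.1 ≤ (j : Int) ∧ (j : Int) < sp.2)) := by
          simp only [Bool.false_or]
          rw [Bool.eq_iff_iff, List.any_eq_true, List.any_eq_true]
          constructor
          · rintro ⟨sp, hsp, hcv⟩
            rw [List.mem_flatMap] at hsp
            obtain ⟨ph, hph, hsp⟩ := hsp
            rw [List.mem_map] at hsp
            obtain ⟨r, hr, rfl⟩ := hsp
            rw [pvMem_occ] at hr
            rw [pvCov] at hcv
            simp only [decide_eq_true_eq] at hcv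
            refine ⟨((cut + r : Nat), ((cut + r : Nat) : Int) + (ph.toList.length : Int)), ?_, ?_⟩
            · rw [List.mem_flatMap]
              refine ⟨ph, hph, ?_⟩
              rw [List.mem_map]
              refine ⟨cut + r, ?_, rfl⟩
              rw [pvMem_occ]
              have := hr.2
              rw [List.drop_drop] at this
              constructor
              · have := hr.1
                rw [List.length_drop, pvLength_lower] at this
                rw [pvLength_lower]
                omega
              · exact this
            · simp only [decide_eq_true_eq]
              have h2 := hcv.2
              push_cast
              omega
          · rintro ⟨sp, hsp, hcv⟩
            rw [List.mem_flatMap] at hsp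
            obtain ⟨ph, hph, hsp⟩ := hsp
            rw [List.mem_map] at hsp
            obtain ⟨i, hi, rfl⟩ := hsp
            rw [pvMem_occ] at hi
            simp only [decide_eq_true_eq] at hcv
            have hicut : cut < i := by
              have := hcv.1
              omega
            refine ⟨((i - cut : Nat), ph.toList.length), ?_, ?_⟩
            · rw [List.mem_flatMap]
              refine ⟨ph, hph, ?_⟩
              rw [List.mem_map]
              refine ⟨i - cut, ?_, rfl⟩
              rw [pvMem_occ]
              constructor
              · rw [List.length_drop, pvLength_lower]
                rw [pvLength_lower] at hi
                omega
              · rw [List.drop_drop, show cut + (i - cut) = i by omega]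
                exact hi.2
            · rw [pvCov]
              simp only [decide_eq_true_eq]
              have h2 := hcv.2
              constructor
              · omega
              constructor
              · omega
              · omega
        rw [← hcov]
        exact pvFinish _ _

-- ===== VERDICT (by name: the statement is the Claim_ definition above) =====
theorem censor_after_two_spec : Claim_equal_censor_after_two := by
  intro text phrase_list _ hpre
  exact pv_main text phrase_list hpre

@[simp] theorem censor_after_two_raises : Claim_raises_censor_after_two := by
  unfold Claim_raises_censor_after_two
  refine ⟨?_, by decide⟩
  intro text pl _ hr hp
  exact hp hr
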